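-- pv_equiv track=rewrite | github.com/pypi-data/pypi-mirror-30 | packages/eClinic/eClinic-1.0-py3-none-any.whl/my_widgets/numbers.py | latin_cardinal
-- ===== SOURCE A (Python) =====
-- def latin_cardinal(n):
--     simple = ["thousand", "mi", "bi", "tri", "quadri", "quinti", "sexti", "septi", "octi", "noni"]
--     units = ["", "un", "do", "tre", "quattuor", "quin", "sex", "septen", "octo", "novem"]
--     tens = ["", "dec", "vigin", "trigin", "quadragin", "quinquagin", "sexagin", "septuagin", "octogin", "nonagin"]
--     hundreds = ["", "cen", "ducen", "trecen", "quadringen", "quingen", "sescen", "septingen", "octingen", "nongen"]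
--
--     suffixes = {
--         "i": "llion",
--         "c": "illion",
--         "a": "tillion",
--         "e": "tillion",
--         "m": "tillion",
--         "n": "tillion",
--         "o": "tillion",
--         "r": "tillion",
--         "x": "tillion",
--         "d": "",
--     }
--
--     results = []
--     if n < 10:
--         results.append(simple[n])
--     else:
--         thousands = 0
--         while n:
--             n, unit = divmod(n, 10)
--             n, ten = divmod(n, 10)
--             n, hun = divmod(n, 10)
--             if hun or ten or unit:
--                 results.extend(["millia"] * thousands)
--             if n or (hun, ten, unit) != (0, 0, 1):
--                 results.extend(filter(None, [tens[ten], units[unit], hundreds[hun]]))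
--             thousands += 1
--     results.insert(0, suffixes[results[0][-1]])
--     return str.join("", reversed(results))
-- ===== SOURCE B (Python) =====
-- def latin_cardinal(n):
--     simple = ["thousand", "mi", "bi", "tri", "quadri", "quinti", "sexti", "septi", "octi", "noni"]
--     units = ["", "un", "do", "tre", "quattuor", "quin", "sex", "septen", "octo", "novem"]
--     tens = ["", "dec", "vigin", "trigin", "quadragin", "quinquagin", "sexagin", "septuagin", "octogin", "nonagin"]
--     hundreds = ["", "cen", "ducen", "trecen", "quadringen", "quingen", "sescen", "septingen", "octingen", "nongen"]
--
--     suffixes = {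
--         "i": "llion",
--         "c": "illion",
--         "a": "tillion",
--         "e": "tillion",
--         "m": "tillion",
--         "n": "tillion",
--         "o": "tillion",
--         "r": "tillion",
--         "x": "tillion",
--         "d": "",
--     }
--
--     if n < 10:
--         name = simple[n]
--         return name + suffixes[name[-1]]
--
--     # Build the name front-to-back by recursing on the higher groups first:
--     # group j (j = number of less-significant 3-digit groups) contributes
--     # hundreds + units + tens followed by j copies of "millia".
--     def rec(m, j):
--         if m == 0:
--             return ""
--         text = rec(m // 1000, j + 1)
--         g = m % 1000
--         if g:
--             part = "" if (m // 1000 == 0 and g == 1) else \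
--                 hundreds[g // 100] + units[g % 10] + tens[g // 10 % 10]
--             text += part + "millia" * j
--         return text
--
--     g0 = n % 1000
--     if g0:
--         c = (tens[g0 // 10 % 10] or units[g0 % 10] or hundreds[g0 // 100])[-1]
--     else:
--         c = "a"
--     return rec(n, 0) + suffixes[c]
-- ===== Notes on version B (the rewrite author's own statement) =====
-- stated objective: alternative
-- what changed: B replaces A's least-significant-first while-loop that accumulates name fragments in a list and finally reverses and joins them with a most-significant-first recursion over 3-digit groups that concatenates the name front-to-back directly (per-group parts emitted in hundreds+units+tens order, 'millia' repetition appended in place) and derives the suffix from the lowest group instead of from the first accumulated fragment.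
import Mathlib
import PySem

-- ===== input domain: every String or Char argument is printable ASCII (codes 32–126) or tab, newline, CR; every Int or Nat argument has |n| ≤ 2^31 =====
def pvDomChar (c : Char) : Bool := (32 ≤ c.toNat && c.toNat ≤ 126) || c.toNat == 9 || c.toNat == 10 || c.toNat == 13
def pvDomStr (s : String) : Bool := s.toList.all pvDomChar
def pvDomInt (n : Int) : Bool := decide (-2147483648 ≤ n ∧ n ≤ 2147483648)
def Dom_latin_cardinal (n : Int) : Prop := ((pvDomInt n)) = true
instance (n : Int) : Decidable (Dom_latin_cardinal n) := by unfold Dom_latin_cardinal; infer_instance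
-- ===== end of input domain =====

-- B builds the name front-to-back by recursing on the higher 3-digit groups first (no result list, no
-- final reversal) and derives the suffix directly from the lowest group; objective: alternative decomposition.

-- shared name tables and suffix dict (identical literals in both Pythons)
def simpleL : List String := ["thousand", "mi", "bi", "tri", "quadri", "quinti", "sexti", "septi", "octi", "noni"]
def unitsL : List String := ["", "un", "do", "tre", "quattuor", "quin", "sex", "septen", "octo", "novem"]
def tensL : List String := ["", "dec", "vigin", "trigin", "quadragin", "quinquagin", "sexagin", "septuagin", "octogin", "nonagin"]
def hundredsL : List String := ["", "cen", "ducen", "trecen", "quadringen", "quingen", "sescen", "septingen", "octingen", "nongen"]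
def suffixesD : PySem.Dict String String :=
  PySem.Dict.ofList [("i", "llion"), ("c", "illion"), ("a", "tillion"), ("e", "tillion"), ("m", "tillion"),
   ("n", "tillion"), ("o", "tillion"), ("r", "tillion"), ("x", "tillion"), ("d", "")]

-- list[int] indexing; exact while the index is in range (digits 0..9; for simple[n], Pre_ gives the range)
def tbl (l : List String) (i : Int) : String := PySem.List.pyGetD l i ""

-- s[-1] used as a dict key (a 1-char string in Python); exact while s is nonempty
def lastChar (s : String) : String := ((PySem.Str.pyGet? s (-1)).map (fun c => String.ofList [c])).getD ""

-- ===== PORT A =====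
def loopA (n : Int) (thousands : Nat) (results : List String) : List String :=
  if h : n ≤ 0 then results   -- 'while n': the guard 'n ≤ 0' (vs '= 0') only totalizes; loopA is applied to n ≥ 0 only
  else
    let unit := PySem.Int.mod n 10
    let n1 := PySem.Int.floordiv n 10
    let ten := PySem.Int.mod n1 10
    let n2 := PySem.Int.floordiv n1 10
    let hun := PySem.Int.mod n2 10
    let n3 := PySem.Int.floordiv n2 10
    let r1 := if hun ≠ 0 ∨ ten ≠ 0 ∨ unit ≠ 0 then results ++ List.replicate thousands "millia" else results
    let r2 := if n3 ≠ 0 ∨ ¬(hun = 0 ∧ ten = 0 ∧ unit = 1) then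
        r1 ++ ([tbl tensL ten, tbl unitsL unit, tbl hundredsL hun].filter (fun s => s ≠ ""))
      else r1
    loopA n3 (thousands + 1) r2
termination_by n.toNat
decreasing_by
  simp only [PySem.Int.floordiv_eq_ediv_of_pos (show (0:Int) < 10 by norm_num)]
  omega

def latin_cardinal (n : Int) : String :=
  let results : List String := if n < 10 then [tbl simpleL n] else loopA n 0 []
  let suffix := PySem.Dict.getD suffixesD (lastChar (PySem.List.pyGetD results 0 "")) ""
  PySem.Str.join "" (PySem.List.insert results 0 suffix).reverse

-- ===== PORT B =====
def strMul (s : String) : Nat → String   -- Python string repetition s * j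
  | 0 => ""
  | k + 1 => s ++ strMul s k

def strOr (a b : String) : String := if a ≠ "" then a else b   -- Python 'a or b' on strings

def recB (m : Int) (j : Nat) : String :=
  if _h : m ≤ 0 then ""   -- Python tests 'm == 0'; the '≤' guard only totalizes, recB is applied to m ≥ 0 only
  else
    let text := recB (PySem.Int.floordiv m 1000) (j + 1)
    let g := PySem.Int.mod m 1000
    if g ≠ 0 then
      let part := if PySem.Int.floordiv m 1000 = 0 ∧ g = 1 then ""
        else tbl hundredsL (PySem.Int.floordiv g 100) ++ tbl unitsL (PySem.Int.mod g 10)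
             ++ tbl tensL (PySem.Int.mod (PySem.Int.floordiv g 10) 10)
      text ++ part ++ strMul "millia" j
    else text
termination_by m.toNat
decreasing_by
  simp only [PySem.Int.floordiv_eq_ediv_of_pos (show (0:Int) < 1000 by norm_num)]
  omega

def latin_cardinal_alt (n : Int) : String :=
  if n < 10 then
    let name := tbl simpleL n
    name ++ PySem.Dict.getD suffixesD (lastChar name) ""
  else
    let g0 := PySem.Int.mod n 1000
    let c := if g0 ≠ 0 then
        lastChar (strOr (strOr (tbl tensL (PySem.Int.mod (PySem.Int.floordiv g0 10) 10))
                               (tbl unitsL (PySem.Int.mod g0 10)))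
                        (tbl hundredsL (PySem.Int.floordiv g0 100)))
      else "a"
    recB n 0 ++ PySem.Dict.getD suffixesD c ""

-- ===== PRECONDITION & SPEC =====
-- Pre_ excludes exactly n ≤ -11, where the Python A raises IndexError (simple[n] out of range).
def Pre_latin_cardinal (n : Int) : Prop := -10 ≤ n
instance (n : Int) : Decidable (Pre_latin_cardinal n) := by unfold Pre_latin_cardinal; infer_instance
def pvWitness_latin_cardinal : Int := (1234)

def Spec_latin_cardinal (n : Int) (out : String) : Prop := out = latin_cardinal_alt n
instance (n : Int) (out : String) : Decidable (Spec_latin_cardinal n out) := by unfold Spec_latin_cardinal; infer_instance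

-- ===== CLAIM (what is proved, stated in full; the proofs are below) =====
def Claim_equal_latin_cardinal : Prop := ∀ (n : Int), Dom_latin_cardinal n → Pre_latin_cardinal n → Spec_latin_cardinal n (latin_cardinal n)

-- ===== LEMMAS AND PROOFS =====

-- characters of a list of strings, in order
def J (l : List String) : List Char := (l.map String.toList).flatten

lemma join_empty_sep (l : List (List Char)) : PySem.Chars.join [] l = l.flatten := by
  induction l with
  | nil => simp [PySem.Chars.join, List.intercalate]
  | cons p rest ih =>
    cases rest with
    | nil => simp [PySem.Chars.join, List.intercalate]
    | cons q rest' =>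
      rw [PySem.Chars.join_cons_cons, ih]
      simp

lemma J_append (l1 l2 : List String) : J (l1 ++ l2) = J l1 ++ J l2 := by
  simp [J]

lemma J_filter_ne (l : List String) : J (l.filter (fun s => s ≠ "")) = J l := by
  induction l with
  | nil => rfl
  | cons a t ih =>
    by_cases h : a = ""
    · subst h
      simpa [J, List.filter_cons] using ih
    · simp only [J, List.filter_cons, h, decide_not] at *
      simp [ih]

lemma J_replicate (j : Nat) (s : String) : J (List.replicate j s) = (strMul s j).toList := by
  induction j with
  | zero => rfl
  | succ k ih => simp [J, List.replicate_succ, strMul] at *; simp [ih]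

lemma tens_empty_iff (d : Int) (h0 : 0 ≤ d) (h1 : d < 10) : tbl tensL d = "" ↔ d = 0 := by
  interval_cases d <;> simp [tbl, tensL] <;> decide

lemma units_empty_iff (d : Int) (h0 : 0 ≤ d) (h1 : d < 10) : tbl unitsL d = "" ↔ d = 0 := by
  interval_cases d <;> simp [tbl, unitsL] <;> decide

lemma hundreds_empty_iff (d : Int) (h0 : 0 ≤ d) (h1 : d < 10) : tbl hundredsL d = "" ↔ d = 0 := by
  interval_cases d <;> simp [tbl, hundredsL] <;> decide

-- the loop only appends: accumulator prefixes commute out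
lemma loopA_nonpos {n : Int} (h : n ≤ 0) (t : Nat) (acc : List String) : loopA n t acc = acc := by
  rw [loopA]; simp [h]

lemma loopA_acc : ∀ (k : Nat) (n : Int), n.toNat ≤ k → ∀ (t : Nat) (acc1 acc2 : List String),
    loopA n t (acc1 ++ acc2) = acc1 ++ loopA n t acc2 := by
  intro k
  induction k with
  | zero =>
    intro n hk t acc1 acc2
    have hn : n ≤ 0 := by omega
    rw [loopA_nonpos hn, loopA_nonpos hn]
  | succ k ih =>
    intro n hk t acc1 acc2
    by_cases hn : n ≤ 0
    · rw [loopA_nonpos hn, loopA_nonpos hn]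
    · conv_lhs => rw [loopA]
      conv_rhs => rw [loopA]
      simp only [dif_neg hn]
      have hdec : (PySem.Int.floordiv (PySem.Int.floordiv (PySem.Int.floordiv n 10) 10) 10).toNat ≤ k := by
        simp only [PySem.Int.floordiv_eq_ediv_of_pos (show (0:Int) < 10 by norm_num)]
        omega
      split_ifs <;> (try simp only [List.append_assoc]) <;> exact ih _ hdec _ acc1 _

lemma loopA_append (n : Int) (t : Nat) (acc : List String) :
    loopA n t acc = acc ++ loopA n t [] := by
  simpa using loopA_acc n.toNat n (le_refl _) t acc []

-- main loop/recursion correspondence: the reversed loop output spells recB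
lemma main_chars : ∀ (k : Nat) (n : Int), n.toNat ≤ k → 0 ≤ n → ∀ (j : Nat),
    J (loopA n j []).reverse = (recB n j).toList := by
  intro k
  induction k with
  | zero =>
    intro n hk h0 j
    have hn : n = 0 := by omega
    subst hn
    rw [loopA, recB]
    simp [J]
  | succ k ih =>
    intro n hk h0 j
    by_cases hn : n ≤ 0
    · have : n = 0 := by omega
      subst this
      rw [loopA, recB]
      simp [J]
    · rw [loopA, recB]
      simp only [dif_neg hn]
      have h10 : (0:Int) < 10 := by norm_num
      have h100 : (0:Int) < 100 := by norm_num
      have h1000 : (0:Int) < 1000 := by norm_num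
      simp only [PySem.Int.floordiv_eq_ediv_of_pos h10, PySem.Int.floordiv_eq_ediv_of_pos h100,
        PySem.Int.floordiv_eq_ediv_of_pos h1000, PySem.Int.mod_eq_emod_of_pos h10,
        PySem.Int.mod_eq_emod_of_pos h1000]
      have e3 : n / 10 / 10 / 10 = n / 1000 := by omega
      have eu : (n % 1000) % 10 = n % 10 := by omega
      have et : (n % 1000) / 10 % 10 = n / 10 % 10 := by omega
      have eh : (n % 1000) / 100 = n / 10 / 10 % 10 := by omega
      have hg : (n / 10 / 10 % 10 ≠ 0 ∨ n / 10 % 10 ≠ 0 ∨ n % 10 ≠ 0) ↔ n % 1000 ≠ 0 := by omega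
      have hc : (n / 10 / 10 / 10 ≠ 0 ∨ ¬(n / 10 / 10 % 10 = 0 ∧ n / 10 % 10 = 0 ∧ n % 10 = 1)) ↔
          ¬(n / 1000 = 0 ∧ n % 1000 = 1) := by omega
      have hdec : (n / 1000).toNat ≤ k := by omega
      have hpos : (0:Int) ≤ n / 1000 := by omega
      rw [loopA_append]
      rw [e3, eu, et, eh]
      have IH := ih (n / 1000) hdec hpos (j + 1)
      by_cases hg0 : n % 1000 = 0
      · have hz : n / 10 / 10 % 10 = 0 ∧ n / 10 % 10 = 0 ∧ n % 10 = 0 := by omega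
        rw [if_neg (show ¬ (n / 10 / 10 % 10 ≠ 0 ∨ n / 10 % 10 ≠ 0 ∨ n % 10 ≠ 0) by omega),
            if_pos (show (n / 1000 ≠ 0 ∨ ¬(n / 10 / 10 % 10 = 0 ∧ n / 10 % 10 = 0 ∧ n % 10 = 1)) by omega),
            if_neg (show ¬ (n % 1000 ≠ 0) by omega)]
        rw [hz.1, hz.2.1, hz.2.2]
        have hfil : ([tbl tensL 0, tbl unitsL 0, tbl hundredsL 0].filter (fun s => s ≠ "")) = [] := by
          simp [tbl, tensL, unitsL, hundredsL, PySem.List.pyGetD_zero_cons]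
        rw [hfil]
        simpa using IH
      · have hM : (n / 10 / 10 % 10 ≠ 0 ∨ n / 10 % 10 ≠ 0 ∨ n % 10 ≠ 0) := by omega
        rw [if_pos hM, if_pos hg0]
        by_cases hC : n / 1000 = 0 ∧ n % 1000 = 1
        · rw [if_neg (show ¬ (n / 1000 ≠ 0 ∨ ¬(n / 10 / 10 % 10 = 0 ∧ n / 10 % 10 = 0 ∧ n % 10 = 1)) by omega),
              if_pos hC]
          simp only [List.nil_append, List.reverse_append, List.reverse_replicate]
          rw [J_append, J_replicate, IH]
          simp
        · rw [if_pos (show (n / 1000 ≠ 0 ∨ ¬(n / 10 / 10 % 10 = 0 ∧ n / 10 % 10 = 0 ∧ n % 10 = 1)) by omega),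
              if_neg hC]
          simp only [List.nil_append, List.append_assoc, List.reverse_append, List.reverse_replicate]
          rw [J_append, J_append, J_replicate, IH]
          rw [← List.filter_reverse, J_filter_ne]
          simp [J]

lemma pyGetD_zero_of_head? {l : List String} {x : String} (h : l.head? = some x) :
    PySem.List.pyGetD l 0 "" = x := by
  cases l with
  | nil => simp at h
  | cons a t => simp at h; subst h; exact PySem.List.pyGetD_zero_cons _ _ _

lemma head_filter_or (t u h : String) (rest : List String) (hne : ¬(t = "" ∧ u = "" ∧ h = "")) :
    ((([t, u, h]).filter (fun s => s ≠ "")) ++ rest).head? = some (strOr (strOr t u) h) := by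
  by_cases ht : t = "" <;> by_cases hu : u = "" <;> by_cases hh : h = "" <;>
    simp_all [strOr, List.filter]

-- a zero low group pushes "millia" to the front of the loop's output
lemma loopA_head_millia : ∀ (k : Nat) (n : Int), n.toNat ≤ k → 0 < n → ∀ (j : Nat), 1 ≤ j →
    (loopA n j []).head? = some "millia" := by
  intro k
  induction k with
  | zero => intro n hk h0 j hj; omega
  | succ k ih =>
    intro n hk h0 j hj
    have hn : ¬ n ≤ 0 := by omega
    rw [loopA]
    simp only [dif_neg hn]
    have h10 : (0:Int) < 10 := by norm_num
    simp only [PySem.Int.floordiv_eq_ediv_of_pos h10, PySem.Int.mod_eq_emod_of_pos h10]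
    by_cases hM : (n / 10 / 10 % 10 ≠ 0 ∨ n / 10 % 10 ≠ 0 ∨ n % 10 ≠ 0)
    · rw [if_pos hM]
      cases j with
      | zero => omega
      | succ j' =>
        rw [loopA_append]
        split_ifs <;> simp [List.replicate_succ]
    · have hz : n / 10 / 10 % 10 = 0 ∧ n / 10 % 10 = 0 ∧ n % 10 = 0 := by omega
      rw [if_neg hM,
          if_pos (show (n / 10 / 10 / 10 ≠ 0 ∨ ¬(n / 10 / 10 % 10 = 0 ∧ n / 10 % 10 = 0 ∧ n % 10 = 1)) by omega)]
      rw [hz.1, hz.2.1, hz.2.2]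
      have hfil : ([tbl tensL 0, tbl unitsL 0, tbl hundredsL 0].filter (fun s => s ≠ "")) = [] := by
        simp [tbl, tensL, unitsL, hundredsL, PySem.List.pyGetD_zero_cons]
      rw [hfil]
      have hn3 : 0 < n / 10 / 10 / 10 := by omega
      have : n / 10 / 10 / 10 = n / 1000 := by omega
      exact this ▸ ih (n / 1000) (by omega) (by omega) (j + 1) (by omega)

-- ===== VERDICT (by name: the statement is the Claim_ definition above) =====
theorem latin_cardinal_spec : Claim_equal_latin_cardinal := by
  intro n _ hpre
  unfold Spec_latin_cardinal Pre_latin_cardinal at *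
  by_cases h10 : n < 10
  · simp only [latin_cardinal, latin_cardinal_alt, if_pos h10]
    rw [PySem.List.pyGetD_zero_cons, PySem.List.insert_zero]
    apply String.toList_inj.mp
    rw [PySem.Str.toList_join]
    simp [join_empty_sep]
  · simp only [latin_cardinal, latin_cardinal_alt, if_neg h10]
    rw [not_lt] at h10
    have hpos : 0 < n := by omega
    have h1000 : (0:Int) < 1000 := by norm_num
    have h100 : (0:Int) < 100 := by norm_num
    have hd10 : (0:Int) < 10 := by norm_num
    -- the suffix keys agree
    have hkey : lastChar (PySem.List.pyGetD (loopA n 0 []) 0 "") =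
        (if PySem.Int.mod n 1000 ≠ 0 then
          lastChar (strOr (strOr (tbl tensL (PySem.Int.mod (PySem.Int.floordiv (PySem.Int.mod n 1000) 10) 10))
                                 (tbl unitsL (PySem.Int.mod (PySem.Int.mod n 1000) 10)))
                          (tbl hundredsL (PySem.Int.floordiv (PySem.Int.mod n 1000) 100)))
         else "a") := by
      simp only [PySem.Int.floordiv_eq_ediv_of_pos hd10, PySem.Int.floordiv_eq_ediv_of_pos h100,
        PySem.Int.mod_eq_emod_of_pos hd10, PySem.Int.mod_eq_emod_of_pos h1000]
      have eu : (n % 1000) % 10 = n % 10 := by omega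
      have et : (n % 1000) / 10 % 10 = n / 10 % 10 := by omega
      have eh : (n % 1000) / 100 = n / 10 / 10 % 10 := by omega
      rw [eu, et, eh]
      by_cases hg0 : n % 1000 = 0
      · rw [if_neg (show ¬ (n % 1000 ≠ 0) by omega)]
        have hz : n / 10 / 10 % 10 = 0 ∧ n / 10 % 10 = 0 ∧ n % 10 = 0 := by omega
        rw [loopA]
        simp only [dif_neg (show ¬ n ≤ 0 by omega)]
        simp only [PySem.Int.floordiv_eq_ediv_of_pos hd10, PySem.Int.mod_eq_emod_of_pos hd10]
        rw [if_neg (show ¬ (n / 10 / 10 % 10 ≠ 0 ∨ n / 10 % 10 ≠ 0 ∨ n % 10 ≠ 0) by omega),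
            if_pos (show (n / 10 / 10 / 10 ≠ 0 ∨ ¬(n / 10 / 10 % 10 = 0 ∧ n / 10 % 10 = 0 ∧ n % 10 = 1)) by omega)]
        rw [hz.1, hz.2.1, hz.2.2]
        have hfil : ([tbl tensL 0, tbl unitsL 0, tbl hundredsL 0].filter (fun s => s ≠ "")) = [] := by
          simp [tbl, tensL, unitsL, hundredsL, PySem.List.pyGetD_zero_cons]
        rw [hfil]
        have hn3 : 0 < n / 10 / 10 / 10 := by omega
        have hhead := loopA_head_millia (n / 10 / 10 / 10).toNat (n / 10 / 10 / 10) (le_refl _) hn3 1 (le_refl _)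
        simp only [List.nil_append]
        rw [pyGetD_zero_of_head? hhead]
        decide
      · rw [if_pos hg0]
        rw [loopA]
        simp only [dif_neg (show ¬ n ≤ 0 by omega)]
        simp only [PySem.Int.floordiv_eq_ediv_of_pos hd10, PySem.Int.mod_eq_emod_of_pos hd10]
        have hM : (n / 10 / 10 % 10 ≠ 0 ∨ n / 10 % 10 ≠ 0 ∨ n % 10 ≠ 0) := by omega
        rw [if_pos hM]
        have hC : (n / 10 / 10 / 10 ≠ 0 ∨ ¬(n / 10 / 10 % 10 = 0 ∧ n / 10 % 10 = 0 ∧ n % 10 = 1)) := by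
          omega
        rw [if_pos hC]
        rw [loopA_append]
        simp only [List.replicate_zero, List.append_nil, List.nil_append]
        have hne : ¬(tbl tensL (n / 10 % 10) = "" ∧ tbl unitsL (n % 10) = "" ∧
            tbl hundredsL (n / 10 / 10 % 10) = "") := by
          intro ⟨a, b, c⟩
          rw [tens_empty_iff _ (by omega) (by omega)] at a
          rw [units_empty_iff _ (by omega) (by omega)] at b
          rw [hundreds_empty_iff _ (by omega) (by omega)] at c
          omega
        rw [pyGetD_zero_of_head? (head_filter_or _ _ _ _ hne)]
    rw [hkey]
    apply String.toList_inj.mp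
    rw [PySem.List.insert_zero, PySem.Str.toList_join]
    simp only [List.reverse_cons, List.map_append]
    have hmain := main_chars n.toNat n (le_refl _) (by omega) 0
    simp only [J, List.map_reverse] at hmain
    rw [show ("" : String).toList = ([] : List Char) from rfl]
    rw [join_empty_sep, List.flatten_append, List.map_reverse, hmain]
    simp
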